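-- pv_equiv track=rewrite | github.com/pypi-data/pypi-mirror-400 | packages/tc3tools/tc3tools-0.1.0-py3-none-any.whl/tc3tools/converters/st_to_xml.py | strip_leading_block_comments
-- ===== SOURCE A (Python) =====
-- def strip_leading_block_comments(content: str) -> str:
--     """Remove leading block comments (* ... *) from content."""
--     content = content.strip()
--     while content.startswith("(*"):
--         end_comment = content.find("*)")
--         if end_comment != -1:
--             content = content[end_comment + 2 :].strip()
--         else:
--             break
--     return content
-- ===== SOURCE B (Python) =====
-- def strip_leading_block_comments(content: str) -> str:
--     """Remove leading block comments from content.
--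
--     Single index scan: instead of repeatedly re-slicing and re-stripping the
--     string, advance a cursor past leading whitespace and each closed comment
--     block, then slice and strip once at the end.
--     """
--     i, n = 0, len(content)
--     while True:
--         while i < n and content[i].isspace():
--             i += 1
--         if content.startswith("(*", i):
--             j = content.find("*)", i)
--             if j == -1:
--                 break
--             i = j + 2
--         else:
--             break
--     return content[i:].strip()
-- ===== Notes on version B (the rewrite author's own statement) =====
-- stated objective: alternative
-- what changed: Replaces A's loop that re-slices and re-strips the string after every comment block with a single cursor scan (skip whitespace, jump past each closed comment block via find) followed by one final slice and strip, so no intermediate strings are built.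
import Mathlib
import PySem

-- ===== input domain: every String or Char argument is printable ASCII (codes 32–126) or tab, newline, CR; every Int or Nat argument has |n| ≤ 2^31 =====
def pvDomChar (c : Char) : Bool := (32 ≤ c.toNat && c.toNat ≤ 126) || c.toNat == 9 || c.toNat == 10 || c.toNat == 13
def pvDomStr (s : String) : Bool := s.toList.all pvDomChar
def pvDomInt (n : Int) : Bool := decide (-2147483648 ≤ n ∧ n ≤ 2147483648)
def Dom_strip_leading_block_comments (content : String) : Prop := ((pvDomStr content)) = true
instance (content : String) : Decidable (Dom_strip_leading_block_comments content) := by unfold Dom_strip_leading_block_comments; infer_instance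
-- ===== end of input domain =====

-- B replaces A's repeated slice-and-strip loop with a single cursor scan and one final
-- slice+strip (objective: alternative — fewer intermediate strings); return values proved equal.

-- used by the ports' termination proofs (cited in decreasing_by)
theorem pvStripLenLe (l : List Char) : (PySem.Chars.strip l).length ≤ l.length := by
  simp only [PySem.Chars.strip, PySem.Chars.rstrip, PySem.Chars.lstrip]
  calc (List.dropWhile PySem.Chars.isspace (List.dropWhile PySem.Chars.isspace l).reverse).reverse.length
      ≤ (List.dropWhile PySem.Chars.isspace l).reverse.length := by
        rw [List.length_reverse]; exact List.length_dropWhile_le _ _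
    _ ≤ l.length := by rw [List.length_reverse]; exact List.length_dropWhile_le _ _

-- ===== PORT A =====
-- A's `while content.startswith("(*")` loop over the current (already stripped) string:
def stripLoopA (c : List Char) : List Char :=
  if h1 : PySem.Chars.startswith c ['(', '*'] = true then
    let e := PySem.Chars.find c ['*', ')']
    if h2 : e ≠ -1 then
      stripLoopA (PySem.Chars.strip (PySem.List.slice c (some (e + 2)) none))
    else c
  else c
termination_by c.length
decreasing_by
  have he : -1 ≤ PySem.Chars.find c ['*', ')'] := PySem.Chars.neg_one_le_find c ['*', ')']
  have hpos : (0:Int) ≤ PySem.Chars.find c ['*', ')'] := by omega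
  have hlen : 2 ≤ c.length := by
    have := (PySem.Chars.startswith_iff c ['(', '*']).mp h1
    simpa using this.length_le
  have hslice : PySem.List.slice c (some (PySem.Chars.find c ['*', ')'] + 2)) none
      = c.drop (PySem.Chars.find c ['*', ')'] + 2).toNat := PySem.List.slice_from c (by omega)
  have h2' : 2 ≤ (PySem.Chars.find c ['*', ')'] + 2).toNat := by omega
  calc (PySem.Chars.strip (PySem.List.slice c (some (PySem.Chars.find c ['*', ')'] + 2)) none)).length
      ≤ (PySem.List.slice c (some (PySem.Chars.find c ['*', ')'] + 2)) none).length := pvStripLenLe _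
    _ = c.length - (PySem.Chars.find c ['*', ')'] + 2).toNat := by rw [hslice, List.length_drop]
    _ < c.length := by omega

def strip_leading_block_comments (content : String) : String :=
  String.ofList (stripLoopA (PySem.Chars.strip content.toList))

-- ===== PORT B =====
-- B keeps a cursor i into `content`; here the cursor is represented by the suffix
-- `content.toList.drop i`, so the inner `while … content[i].isspace(): i += 1` loop is
-- `dropWhile`, `content.startswith("(*", i)` / `content.find("*)", i)` act on the suffix,
-- and `i = j + 2` is `drop (j+2)` of the suffix (exact: j ≥ 0 when "*)"  is found).
def scanLoopB (l : List Char) : List Char :=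
  if h1 : PySem.Chars.startswith (l.dropWhile PySem.Chars.isspace) ['(', '*'] = true then
    if h2 : PySem.Chars.find (l.dropWhile PySem.Chars.isspace) ['*', ')'] = -1 then
      l.dropWhile PySem.Chars.isspace
    else
      scanLoopB ((l.dropWhile PySem.Chars.isspace).drop
        (PySem.Chars.find (l.dropWhile PySem.Chars.isspace) ['*', ')'] + 2).toNat)
  else l.dropWhile PySem.Chars.isspace
termination_by l.length
decreasing_by
  have hd : (l.dropWhile PySem.Chars.isspace).length ≤ l.length := List.length_dropWhile_le _ _
  have he : -1 ≤ PySem.Chars.find (l.dropWhile PySem.Chars.isspace) ['*', ')'] :=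
    PySem.Chars.neg_one_le_find _ _
  have hlen : 2 ≤ (l.dropWhile PySem.Chars.isspace).length := by
    have := (PySem.Chars.startswith_iff (l.dropWhile PySem.Chars.isspace) ['(', '*']).mp h1
    simpa using this.length_le
  have h2' : 2 ≤ (PySem.Chars.find (l.dropWhile PySem.Chars.isspace) ['*', ')'] + 2).toNat := by
    omega
  simp only [List.length_drop]
  omega

def strip_leading_block_comments_alt (content : String) : String :=
  String.ofList (PySem.Chars.strip (scanLoopB content.toList))

-- ===== PRECONDITION & SPEC =====
def Spec_strip_leading_block_comments (content : String) (out : String) : Prop := out = strip_leading_block_comments_alt content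
instance (content : String) (out : String) : Decidable (Spec_strip_leading_block_comments content out) := by unfold Spec_strip_leading_block_comments; infer_instance

-- ===== CLAIM (what is proved, stated in full; the proofs are below) =====
def Claim_equal_strip_leading_block_comments : Prop := ∀ (content : String), Dom_strip_leading_block_comments content → Spec_strip_leading_block_comments content (strip_leading_block_comments content)

-- ===== LEMMAS AND PROOFS =====

-- l splits as rstrip l ++ (an all-whitespace tail)
theorem pvRstripDecomp (l : List Char) :
    ∃ t, l = PySem.Chars.rstrip l ++ t ∧ ∀ c ∈ t, PySem.Chars.isspace c = true := by
  refine ⟨(l.reverse.takeWhile PySem.Chars.isspace).reverse, ?_, ?_⟩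
  · conv_lhs => rw [← l.reverse_reverse,
      ← List.takeWhile_append_dropWhile (p := PySem.Chars.isspace) (l := l.reverse)]
    rw [List.reverse_append]
    rfl
  · intro c hc
    exact List.mem_takeWhile_imp (List.mem_reverse.mp hc)

-- a prefix of (r ++ ws-tail).drop j made of non-whitespace chars lies entirely in r
theorem pvPrefixDropClean {r t p : List Char}
    (ht : ∀ c ∈ t, PySem.Chars.isspace c = true)
    (hp : ∀ c ∈ p, PySem.Chars.isspace c = false) (hne : p ≠ []) {j : Nat}
    (h : p <+: (r ++ t).drop j) : j + p.length ≤ r.length ∧ p <+: r.drop j := by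
  have hple : 1 ≤ p.length := by
    cases p with
    | nil => exact absurd rfl hne
    | cons a l => simp
  have hlen : p.length ≤ (r ++ t).length - j := by
    simpa [List.length_drop] using h.length_le
  have htot : j + p.length ≤ r.length + t.length := by
    simp [List.length_append] at hlen; omega
  have hjr : j + p.length ≤ r.length := by
    by_contra hlt
    have hm1 : r.length ≤ max j r.length := le_max_right _ _
    have hmj : max j r.length - j < p.length := by omega
    have htake := List.prefix_iff_eq_take.mp h
    have hgoal : PySem.Chars.isspace (p[max j r.length - j]'hmj) = true := by
      rw [List.getElem_of_eq htake hmj, List.getElem_take, List.getElem_drop,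
        List.getElem_append_right (by omega)]
      exact ht _ (List.getElem_mem _)
    rw [hp _ (List.getElem_mem hmj)] at hgoal
    exact absurd hgoal (by simp)
  refine ⟨hjr, ?_⟩
  have hdrop : (r ++ t).drop j = r.drop j ++ t := List.drop_append_of_le_length (by omega)
  rw [hdrop] at h
  have htake := List.prefix_iff_eq_take.mp h
  rw [List.take_append_of_le_length (by simp [List.length_drop]; omega)] at htake
  exact List.prefix_iff_eq_take.mpr htake

theorem pvPatNE1 : (['(', '*'] : List Char) ≠ [] := by simp
theorem pvPatWS1 : ∀ c ∈ (['(', '*'] : List Char), PySem.Chars.isspace c = false := by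
  intro c hc
  simp only [List.mem_cons, List.not_mem_nil, or_false] at hc
  rcases hc with rfl | rfl <;> simp [PySem.Chars.isspace]
theorem pvPatNE2 : (['*', ')'] : List Char) ≠ [] := by simp
theorem pvPatWS2 : ∀ c ∈ (['*', ')'] : List Char), PySem.Chars.isspace c = false := by
  intro c hc
  simp only [List.mem_cons, List.not_mem_nil, or_false] at hc
  rcases hc with rfl | rfl <;> simp [PySem.Chars.isspace]

theorem pvStartswithClean {r t : List Char} (ht : ∀ c ∈ t, PySem.Chars.isspace c = true) :
    PySem.Chars.startswith (r ++ t) ['(', '*'] = PySem.Chars.startswith r ['(', '*'] := by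
  by_cases hr : PySem.Chars.startswith r ['(', '*'] = true
  · rw [hr]
    exact (PySem.Chars.startswith_iff _ _).mpr
      (((PySem.Chars.startswith_iff _ _).mp hr).trans (List.prefix_append r t))
  · rw [Bool.eq_false_iff.mpr hr, Bool.eq_false_iff]
    intro hl
    have h := (PySem.Chars.startswith_iff _ _).mp hl
    have := (pvPrefixDropClean ht pvPatWS1 pvPatNE1 (j := 0) (by simpa using h)).2
    exact hr ((PySem.Chars.startswith_iff _ _).mpr (by simpa using this))

theorem pvInfixClean {r t : List Char} (ht : ∀ c ∈ t, PySem.Chars.isspace c = true)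
    (h : (['*', ')'] : List Char) <:+: (r ++ t)) : (['*', ')'] : List Char) <:+: r := by
  obtain ⟨j, hj⟩ := (PySem.Chars.exists_prefix_drop_iff_isIn _ _).mpr
    ((PySem.Chars.isIn_iff_infix _ _).mpr h)
  have := (pvPrefixDropClean ht pvPatWS2 pvPatNE2 hj).2
  exact this.isInfix.trans (List.drop_suffix j r).isInfix

theorem pvFindClean {r t : List Char} (ht : ∀ c ∈ t, PySem.Chars.isspace c = true) :
    PySem.Chars.find (r ++ t) ['*', ')'] = PySem.Chars.find r ['*', ')'] := by
  by_cases hr : PySem.Chars.find r ['*', ')'] = -1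
  · rw [hr, (PySem.Chars.find_eq_neg_one_iff _ _)]
    intro hinf
    exact ((PySem.Chars.find_eq_neg_one_iff _ _).mp hr) (pvInfixClean ht hinf)
  · have hrpos : 0 ≤ PySem.Chars.find r ['*', ')'] := by
      have := PySem.Chars.neg_one_le_find r ['*', ')']
      omega
    obtain ⟨hocc, hmin⟩ := PySem.Chars.find_spec hrpos
    have hocclen : (PySem.Chars.find r ['*', ')']).toNat + 2 ≤ r.length := by
      have h1 := hocc.length_le
      simp only [List.length_drop, List.length_cons, List.length_nil] at h1
      have h2 : (PySem.Chars.find r ['*', ')']) ≤ r.length := PySem.Chars.find_le_length _ _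
      omega
    have hocc' : (['*', ')'] : List Char) <+: (r ++ t).drop (PySem.Chars.find r ['*', ')']).toNat := by
      rw [List.drop_append_of_le_length (by omega)]
      exact hocc.trans (List.prefix_append _ t)
    have hfpos : 0 ≤ PySem.Chars.find (r ++ t) ['*', ')'] := by
      rw [PySem.Chars.find_nonneg_iff]
      exact (hocc'.isInfix).trans (List.drop_suffix _ _).isInfix
    obtain ⟨focc, fmin⟩ := PySem.Chars.find_spec hfpos
    have h1 : ¬ (PySem.Chars.find r ['*', ')']).toNat < (PySem.Chars.find (r ++ t) ['*', ')']).toNat := by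
      intro hlt
      exact fmin _ hlt hocc'
    have h2 : ¬ (PySem.Chars.find (r ++ t) ['*', ')']).toNat < (PySem.Chars.find r ['*', ')']).toNat := by
      intro hlt
      exact hmin _ hlt (pvPrefixDropClean ht pvPatWS2 pvPatNE2 focc).2
    omega

theorem pvRstripAppendWs {y t : List Char} (ht : ∀ c ∈ t, PySem.Chars.isspace c = true) :
    PySem.Chars.rstrip (y ++ t) = PySem.Chars.rstrip y := by
  simp only [PySem.Chars.rstrip, List.reverse_append, List.dropWhile_append,
    List.dropWhile_eq_nil_iff.mpr (fun c hc => ht c (List.mem_reverse.mp hc))]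
  simp

theorem pvStripAppendWs {x t : List Char} (ht : ∀ c ∈ t, PySem.Chars.isspace c = true) :
    PySem.Chars.strip (x ++ t) = PySem.Chars.strip x := by
  simp only [PySem.Chars.strip, PySem.Chars.lstrip, List.dropWhile_append]
  by_cases hx : (List.dropWhile PySem.Chars.isspace x).isEmpty = true
  · rw [if_pos hx, List.dropWhile_eq_nil_iff.mpr ht]
    simp only [List.isEmpty_iff] at hx
    rw [hx]
  · rw [if_neg hx]
    exact pvRstripAppendWs ht

theorem pvStripLstrip (l : List Char) :
    PySem.Chars.strip (l.dropWhile PySem.Chars.isspace) = PySem.Chars.strip l := by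
  simp only [PySem.Chars.strip, PySem.Chars.lstrip, List.dropWhile_idempotent]

theorem pvMainLoop : ∀ (n : Nat) (l : List Char), l.length ≤ n →
    stripLoopA (PySem.Chars.strip l) = PySem.Chars.strip (scanLoopB l) := by
  intro n
  induction n with
  | zero =>
    intro l hl
    have hnil : l = [] := List.eq_nil_of_length_eq_zero (Nat.le_zero.mp hl)
    subst hnil
    rw [scanLoopB, stripLoopA]
    simp [PySem.Chars.strip, PySem.Chars.lstrip, PySem.Chars.rstrip, PySem.Chars.startswith]
  | succ n ih =>
    intro l hl
    obtain ⟨t, hdec, ht⟩ := pvRstripDecomp (l.dropWhile PySem.Chars.isspace)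
    have hstrip : PySem.Chars.strip l = PySem.Chars.rstrip (l.dropWhile PySem.Chars.isspace) := rfl
    have hsw : PySem.Chars.startswith (l.dropWhile PySem.Chars.isspace) ['(', '*']
        = PySem.Chars.startswith (PySem.Chars.rstrip (l.dropWhile PySem.Chars.isspace)) ['(', '*'] := by
      conv_lhs => rw [hdec]
      exact pvStartswithClean ht
    have hfind : PySem.Chars.find (l.dropWhile PySem.Chars.isspace) ['*', ')']
        = PySem.Chars.find (PySem.Chars.rstrip (l.dropWhile PySem.Chars.isspace)) ['*', ')'] := by
      conv_lhs => rw [hdec]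
      exact pvFindClean ht
    rw [scanLoopB, stripLoopA]
    simp only [hstrip]
    by_cases hB : PySem.Chars.startswith (l.dropWhile PySem.Chars.isspace) ['(', '*'] = true
    · rw [dif_pos hB, dif_pos (hsw ▸ hB)]
      by_cases hF : PySem.Chars.find (l.dropWhile PySem.Chars.isspace) ['*', ')'] = -1
      · rw [dif_pos hF, dif_neg (by rw [← hfind]; simpa using hF)]
        rw [pvStripLstrip l, hstrip]
      · rw [dif_neg hF, dif_pos (by rw [← hfind]; exact hF)]
        have hepos : 0 ≤ PySem.Chars.find (PySem.Chars.rstrip (l.dropWhile PySem.Chars.isspace)) ['*', ')'] := by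
          have h1 := PySem.Chars.neg_one_le_find (PySem.Chars.rstrip (l.dropWhile PySem.Chars.isspace)) ['*', ')']
          rw [← hfind] at h1 ⊢
          omega
        obtain ⟨hocc, -⟩ := PySem.Chars.find_spec hepos
        have hocclen : (PySem.Chars.find (PySem.Chars.rstrip (l.dropWhile PySem.Chars.isspace)) ['*', ')']).toNat + 2
            ≤ (PySem.Chars.rstrip (l.dropWhile PySem.Chars.isspace)).length := by
          have h1 := hocc.length_le
          simp only [List.length_drop, List.length_cons, List.length_nil] at h1
          have h2 := PySem.Chars.find_le_length (PySem.Chars.rstrip (l.dropWhile PySem.Chars.isspace)) ['*', ')']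
          omega
        have hslice : PySem.List.slice (PySem.Chars.rstrip (l.dropWhile PySem.Chars.isspace))
            (some (PySem.Chars.find (PySem.Chars.rstrip (l.dropWhile PySem.Chars.isspace)) ['*', ')'] + 2)) none
            = (PySem.Chars.rstrip (l.dropWhile PySem.Chars.isspace)).drop
              (PySem.Chars.find (PySem.Chars.rstrip (l.dropWhile PySem.Chars.isspace)) ['*', ')'] + 2).toNat :=
          PySem.List.slice_from _ (by omega)
        have hdropGen : ∀ k : Nat, k ≤ (PySem.Chars.rstrip (l.dropWhile PySem.Chars.isspace)).length →
            (l.dropWhile PySem.Chars.isspace).drop k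
              = (PySem.Chars.rstrip (l.dropWhile PySem.Chars.isspace)).drop k ++ t := by
          intro k hk
          conv_lhs => rw [hdec]
          exact List.drop_append_of_le_length hk
        have hdrop := hdropGen
          (PySem.Chars.find (PySem.Chars.rstrip (l.dropWhile PySem.Chars.isspace)) ['*', ')'] + 2).toNat
          (by omega)
        have hstripeq : PySem.Chars.strip ((PySem.Chars.rstrip (l.dropWhile PySem.Chars.isspace)).drop
              (PySem.Chars.find (PySem.Chars.rstrip (l.dropWhile PySem.Chars.isspace)) ['*', ')'] + 2).toNat)
            = PySem.Chars.strip ((l.dropWhile PySem.Chars.isspace).drop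
              (PySem.Chars.find (PySem.Chars.rstrip (l.dropWhile PySem.Chars.isspace)) ['*', ')'] + 2).toNat) := by
          rw [hdrop, pvStripAppendWs ht]
        have hlW : 2 ≤ (l.dropWhile PySem.Chars.isspace).length := by
          have := ((PySem.Chars.startswith_iff _ _).mp hB).length_le
          simpa using this
        have hlen' : ((l.dropWhile PySem.Chars.isspace).drop
              (PySem.Chars.find (PySem.Chars.rstrip (l.dropWhile PySem.Chars.isspace)) ['*', ')'] + 2).toNat).length ≤ n := by
          have h1 : (l.dropWhile PySem.Chars.isspace).length ≤ l.length :=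
            List.length_dropWhile_le _ _
          simp only [List.length_drop]
          omega
        rw [hfind, hslice, hstripeq]
        exact ih _ hlen'
    · rw [dif_neg hB, dif_neg (by rw [← hsw]; exact hB)]
      rw [pvStripLstrip l, hstrip]

-- ===== VERDICT (by name: the statement is the Claim_ definition above) =====
theorem strip_leading_block_comments_spec : Claim_equal_strip_leading_block_comments := by
  intro content _
  unfold Spec_strip_leading_block_comments strip_leading_block_comments strip_leading_block_comments_alt
  rw [pvMainLoop content.toList.length content.toList le_rfl]
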